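-- pv_equiv track=rewrite | github.com/potatodevyjh/Algorithms | W.4 Hash/(실패)전화번호 목록.py | solution
-- ===== SOURCE A (Python) =====
-- def solution(phone_book):
--     answer = True
--     for i in range(len(phone_book)):
--         for j in range(len(phone_book) - i - 1):
--             length = len(phone_book[i])
--             now = i + j + 1
--             if length <= len(phone_book[now]):
--                 now_phone = phone_book[now][:length]
--                 if phone_book[i] == now_phone:
--                     answer = False
--                     break
--     return answer
-- ===== SOURCE B (Python) =====
-- def solution(phone_book):
--     seen = set()
--     for s in phone_book:
--         for L in range(len(s) + 1):
--             if s[:L] in seen: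
--                 return False
--         seen.add(s)
--     return True
-- ===== Notes on version B (the rewrite author's own statement) =====
-- stated objective: faster
-- what changed: Replaces the O(n^2) all-later-pairs scan by a single pass that hashes each string into a set and, per string, looks up all of its prefixes among the previously seen strings (O(n*L^2) expected).
import Mathlib
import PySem

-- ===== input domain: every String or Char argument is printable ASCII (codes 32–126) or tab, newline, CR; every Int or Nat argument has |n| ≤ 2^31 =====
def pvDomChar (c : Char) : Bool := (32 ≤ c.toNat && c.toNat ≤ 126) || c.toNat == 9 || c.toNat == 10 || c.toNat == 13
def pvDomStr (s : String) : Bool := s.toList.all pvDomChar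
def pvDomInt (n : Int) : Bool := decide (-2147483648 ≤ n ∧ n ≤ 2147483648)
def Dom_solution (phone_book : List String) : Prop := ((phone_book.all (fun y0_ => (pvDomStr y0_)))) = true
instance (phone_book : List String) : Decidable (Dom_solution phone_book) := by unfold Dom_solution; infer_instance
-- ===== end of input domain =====

-- B replaces A's quadratic all-later-pairs scan by one pass with a hash set of seen strings,
-- checking each string's prefixes against it (objective: faster).

-- ===== PORT A =====
-- inner 'for j in range(len(pb)-i-1): … break' loop, carrying answer; 'false' on the break path
def solInnerA (pb : List String) (i : Int) (js : List Int) (answer : Bool) : Bool :=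
  match js with
  | [] => answer
  | j :: rest =>
      let length := PySem.Str.len (PySem.List.pyGetD pb i "")
      let now := i + j + 1
      if length ≤ PySem.Str.len (PySem.List.pyGetD pb now "") then
        let now_phone := PySem.Str.slice (PySem.List.pyGetD pb now "") none (some length)
        if PySem.List.pyGetD pb i "" == now_phone then
          false
        else solInnerA pb i rest answer
      else solInnerA pb i rest answer

-- outer 'for i in range(len(pb))' loop
def solOuterA (pb : List String) (is : List Int) (answer : Bool) : Bool :=
  match is with
  | [] => answer
  | i :: rest =>
      solOuterA pb rest
        (solInnerA pb i (PySem.List.pyRange 0 ((pb.length : Int) - i - 1) 1) answer)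

def solution (phone_book : List String) : Bool :=
  solOuterA phone_book (PySem.List.pyRange 0 (phone_book.length : Int) 1) true

-- ===== PORT B =====
-- 'for s in phone_book: for L in range(len(s)+1): if s[:L] in seen: return False; seen.add(s)'
def solLoopB (seen : PySem.Set String) (rest : List String) : Bool :=
  match rest with
  | [] => true
  | s :: r =>
      if (PySem.List.pyRange 0 (PySem.Str.len s + 1) 1).any
           (fun L => PySem.Set.contains seen (PySem.Str.slice s none (some L))) then
        false
      else
        solLoopB (PySem.Set.add seen s) r

def solution_alt (phone_book : List String) : Bool :=
  solLoopB PySem.Set.empty phone_book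

-- ===== PRECONDITION & SPEC =====
def Spec_solution (phone_book : List String) (out : Bool) : Prop := out = solution_alt phone_book
instance (phone_book : List String) (out : Bool) : Decidable (Spec_solution phone_book out) := by unfold Spec_solution; infer_instance

-- ===== CLAIM (what is proved, stated in full; the proofs are below) =====
def Claim_equal_solution : Prop := ∀ (phone_book : List String), Dom_solution phone_book → Spec_solution phone_book (solution phone_book)

-- ===== LEMMAS AND PROOFS =====

-- 'earlier string t is a prefix of s', the condition both programs detect
def pref (t s : String) : Bool := t.toList.isPrefixOf s.toList

-- 'some earlier element is a prefix of a later one', recursively over the list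
def badPairs : List String → Bool
  | [] => false
  | s :: r => r.any (fun x => pref s x) || badPairs r

-- both programs return true iff no earlier element indexes before a later one it prefixes
def hasBadIdx (pb : List String) : Prop :=
  ∃ a b : Nat, a < b ∧ b < pb.length ∧ pref (pb.getD a "") (pb.getD b "") = true

theorem condA_eq_pref (t s : String) :
    ((PySem.Str.len t ≤ PySem.Str.len s : Bool) &&
      (t == PySem.Str.slice s none (some (PySem.Str.len t)))) = pref t s := by
  have hsl : (PySem.Str.slice s none (some (PySem.Str.len t))).toList
      = s.toList.take t.toList.length := by
    rw [PySem.Str.toList_slice]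
    show PySem.List.slice s.toList none (some (PySem.Str.len t)) = _
    rw [PySem.Str.len_eq, PySem.List.slice_to _ (by positivity)]
    simp
  rw [PySem.Str.len_eq] at hsl
  rw [Bool.eq_iff_iff]
  simp only [Bool.and_eq_true, decide_eq_true_eq, beq_iff_eq, pref,
    List.isPrefixOf_iff_prefix, PySem.Str.len_eq]
  constructor
  · rintro ⟨hle, heq⟩
    rw [List.prefix_iff_eq_take]
    conv_lhs => rw [heq]
    rw [hsl]
  · intro h
    refine ⟨by exact_mod_cast h.length_le, ?_⟩
    apply String.toList_inj.mp
    rw [hsl, ← List.prefix_iff_eq_take.mp h]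

theorem slice_toList (s : String) (L : Int) (h : 0 ≤ L) :
    (PySem.Str.slice s none (some L)).toList = s.toList.take L.toNat := by
  rw [PySem.Str.toList_slice]
  show PySem.List.slice s.toList none (some L) = _
  rw [PySem.List.slice_to _ h]

theorem solInnerA_step (pb : List String) (i j : Int) (rest : List Int) (answer : Bool) :
    solInnerA pb i (j :: rest) answer
      = if pref (PySem.List.pyGetD pb i "") (PySem.List.pyGetD pb (i + j + 1) "") then false
        else solInnerA pb i rest answer := by
  rw [← condA_eq_pref]
  show (if _ ≤ _ then _ else _) = _
  by_cases h1 : PySem.Str.len (PySem.List.pyGetD pb i "") ≤ PySem.Str.len (PySem.List.pyGetD pb (i + j + 1) "")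
  · rw [if_pos h1]
    cases h2 : (PySem.List.pyGetD pb i "" == PySem.Str.slice (PySem.List.pyGetD pb (i + j + 1) "") none (some (PySem.Str.len (PySem.List.pyGetD pb i "")))) with
    | true => simp only [h1, decide_true, Bool.true_and, if_true]
    | false => simp only [Bool.and_false, Bool.false_eq_true, if_false]
  · rw [if_neg h1]
    simp only [h1, decide_false, Bool.false_and, Bool.false_eq_true, if_false]

theorem solInnerA_false (pb : List String) (i : Int) (js : List Int) :
    solInnerA pb i js false = false := by
  induction js with
  | nil => rfl
  | cons j rest ih => rw [solInnerA_step]; split <;> simp [ih]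

theorem solInnerA_true (pb : List String) (i : Int) (js : List Int) :
    solInnerA pb i js true
      = !(js.any (fun j => pref (PySem.List.pyGetD pb i "") (PySem.List.pyGetD pb (i + j + 1) ""))) := by
  induction js with
  | nil => rfl
  | cons j rest ih => rw [solInnerA_step]; split <;> simp_all

theorem solOuterA_eq (pb : List String) (is : List Int) (ans : Bool) :
    solOuterA pb is ans
      = (ans && !(is.any (fun i =>
          (PySem.List.pyRange 0 ((pb.length : Int) - i - 1) 1).any
            (fun j => pref (PySem.List.pyGetD pb i "") (PySem.List.pyGetD pb (i + j + 1) ""))))) := by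
  induction is generalizing ans with
  | nil => cases ans <;> rfl
  | cons i rest ih =>
      show solOuterA pb rest _ = _
      cases ans with
      | false => rw [solInnerA_false, ih]; simp
      | true =>
          rw [solInnerA_true, ih]
          cases h : (PySem.List.pyRange 0 ((pb.length : Int) - i - 1) 1).any
            (fun j => pref (PySem.List.pyGetD pb i "") (PySem.List.pyGetD pb (i + j + 1) "")) <;>
            simp [h]

theorem scanB_eq (seen : PySem.Set String) (s : String) :
    ((PySem.List.pyRange 0 (PySem.Str.len s + 1) 1).any
        (fun L => PySem.Set.contains seen (PySem.Str.slice s none (some L))))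
      = seen.any (fun t => pref t s) := by
  rw [Bool.eq_iff_iff]
  simp only [List.any_eq_true, PySem.List.mem_pyRange_one]
  constructor
  · rintro ⟨L, ⟨h0, _⟩, hc⟩
    refine ⟨_, (PySem.Set.contains_iff _ _).mp hc, ?_⟩
    simp only [pref, List.isPrefixOf_iff_prefix, slice_toList s L h0]
    exact List.take_prefix _ _
  · rintro ⟨t, ht, hp⟩
    simp only [pref, List.isPrefixOf_iff_prefix] at hp
    refine ⟨(t.toList.length : Int), ⟨by positivity, ?_⟩, ?_⟩
    · rw [PySem.Str.len_eq]
      have := hp.length_le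
      omega
    · have : PySem.Str.slice s none (some (t.toList.length : Int)) = t := by
        apply String.toList_inj.mp
        rw [slice_toList s _ (by positivity), Int.toNat_natCast]
        exact (List.prefix_iff_eq_take.mp hp).symm
      rw [this]
      exact (PySem.Set.contains_iff _ _).mpr ht

theorem set_add_any (seen : PySem.Set String) (x : String) (p : String → Bool) :
    (PySem.Set.add seen x).any p = (seen.any p || p x) := by
  rw [Bool.eq_iff_iff]
  simp only [List.any_eq_true, Bool.or_eq_true]
  constructor
  · rintro ⟨y, hy, hp⟩
    rcases (PySem.Set.mem_add seen x y).mp hy with h | rfl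
    · exact Or.inl ⟨y, h, hp⟩
    · exact Or.inr hp
  · rintro (⟨y, hy, hp⟩ | hp)
    · exact ⟨y, (PySem.Set.mem_add seen x y).mpr (Or.inl hy), hp⟩
    · exact ⟨x, (PySem.Set.mem_add seen x x).mpr (Or.inr rfl), hp⟩

theorem solLoopB_eq (seen : PySem.Set String) (l : List String) :
    solLoopB seen l
      = !((l.any (fun s => seen.any (fun t => pref t s))) || badPairs l) := by
  induction l generalizing seen with
  | nil => rfl
  | cons s r ih =>
      show (if _ then false else solLoopB _ r) = _
      rw [scanB_eq]
      cases h : seen.any (fun t => pref t s) with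
      | true => simp [badPairs, h]
      | false =>
          rw [if_neg (by simp), ih]
          have hadd : ∀ x : String,
              (PySem.Set.add seen s).any (fun t => pref t x)
                = (seen.any (fun t => pref t x) || pref s x) :=
            fun x => set_add_any seen s (fun t => pref t x)
          simp only [List.any_cons, badPairs, h, hadd]
          congr 1
          rw [Bool.eq_iff_iff]
          simp only [Bool.or_eq_true, List.any_eq_true]
          aesop

theorem badPairs_iff (pb : List String) : badPairs pb = true ↔ hasBadIdx pb := by
  induction pb with
  | nil => simp [badPairs, hasBadIdx]
  | cons s r ih =>
      simp only [badPairs, Bool.or_eq_true, List.any_eq_true, ih, hasBadIdx]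
      constructor
      · rintro (⟨x, hx, hp⟩ | ⟨a, b, hab, hb, hp⟩)
        · obtain ⟨k, hk, rfl⟩ := List.mem_iff_getElem.mp hx
          exact ⟨0, k + 1, by omega, by simpa using by omega, by
            simpa [List.getD, List.getElem?_eq_getElem hk] using hp⟩
        · exact ⟨a + 1, b + 1, by omega, by simpa using hb, by simpa using hp⟩
      · rintro ⟨a, b, hab, hb, hp⟩
        simp only [List.length_cons] at hb
        match a, b with
        | 0, b + 1 =>
            left
            refine ⟨r.getD b "", ?_, by simpa using hp⟩
            have hbr : b < r.length := by omega
            rw [List.getD, List.getElem?_eq_getElem hbr]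
            exact List.mem_of_getElem rfl
        | a + 1, b + 1 =>
            right
            exact ⟨a, b, by omega, by omega, by simpa using hp⟩

theorem anyIdx_iff (pb : List String) :
    ((PySem.List.pyRange 0 (pb.length : Int) 1).any (fun i =>
        (PySem.List.pyRange 0 ((pb.length : Int) - i - 1) 1).any
          (fun j => pref (PySem.List.pyGetD pb i "") (PySem.List.pyGetD pb (i + j + 1) "")))) = true
      ↔ hasBadIdx pb := by
  simp only [List.any_eq_true, PySem.List.mem_pyRange_one]
  constructor
  · rintro ⟨i, ⟨hi0, hin⟩, j, ⟨hj0, hjn⟩, hp⟩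
    refine ⟨i.toNat, i.toNat + j.toNat + 1, by omega, by omega, ?_⟩
    have h1 : PySem.List.pyGetD pb i "" = pb.getD i.toNat "" := by
      conv_lhs => rw [show i = (i.toNat : Int) from by omega]
      rw [PySem.List.pyGetD_natCast]
    have h2 : PySem.List.pyGetD pb (i + j + 1) "" = pb.getD (i.toNat + j.toNat + 1) "" := by
      rw [show i + j + 1 = ((i.toNat + j.toNat + 1 : Nat) : Int) by omega, PySem.List.pyGetD_natCast]
    rwa [h1, h2] at hp
  · rintro ⟨a, b, hab, hb, hp⟩
    refine ⟨(a : Int), ⟨by omega, by omega⟩, ((b - a - 1 : Nat) : Int), ⟨by omega, by omega⟩, ?_⟩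
    have h1 : PySem.List.pyGetD pb (a : Int) "" = pb.getD a "" := PySem.List.pyGetD_natCast pb a ""
    have h2 : PySem.List.pyGetD pb ((a : Int) + ((b - a - 1 : Nat) : Int) + 1) "" = pb.getD b "" := by
      rw [show (a : Int) + ((b - a - 1 : Nat) : Int) + 1 = ((b : Nat) : Int) by omega,
        PySem.List.pyGetD_natCast]
    rwa [h1, h2]

theorem solution_eq_not_badPairs (pb : List String) : solution pb = !badPairs pb := by
  rw [solution, solOuterA_eq, Bool.true_and]
  congr 1
  rw [Bool.eq_iff_iff, anyIdx_iff, badPairs_iff]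

theorem solution_alt_eq_not_badPairs (pb : List String) : solution_alt pb = !badPairs pb := by
  rw [solution_alt, solLoopB_eq]
  congr 1
  simp [PySem.Set.empty]

-- ===== VERDICT (by name: the statement is the Claim_ definition above) =====
theorem solution_spec : Claim_equal_solution := by
  intro pb _
  unfold Spec_solution
  rw [solution_eq_not_badPairs, solution_alt_eq_not_badPairs]
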